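-- pv_equiv track=rewrite | github.com/webForDave/string-analyzer | strings/utils.py | parse_natural_language_query
-- ===== SOURCE A (Python) =====
-- def parse_natural_language_query(query: str) -> dict:
--     query = query.lower().strip()
--     parsed_filters = {}
--
--     if "single word" in query or "one word" in query:
--         if 'word_count' in parsed_filters and parsed_filters['word_count'] != '1':
--              raise ValueError("Conflicting word count filters: 'single word' conflicts with another count.")
--         parsed_filters['word_count'] = '1'
--
--     word_to_num = {"two": 2, "three": 3, "four": 4, "five": 5}
--     for word, num in word_to_num.items():
--         if f"{word} word" in query or f"{word} words" in query:
--             if 'word_count' in parsed_filters and parsed_filters['word_count'] != str(num):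
--                 raise ValueError(f"Conflicting word count filters: '{word}' conflicts with another count.")
--
--             parsed_filters['word_count'] = str(num)
--
--     if not parsed_filters:
--         raise ValueError("Unable to parse a valid filter from the query.")
--
--     return parsed_filters
-- ===== SOURCE B (Python) =====
-- _PATTERNS = [("single word", 1), ("one word", 1), ("two word", 2),
--              ("three word", 3), ("four word", 4), ("five word", 5)]
--
--
-- def parse_natural_language_query(query: str) -> dict:
--     # One anchored sweep over the query: at each position test whether one of the
--     # count patterns starts there ("X words" matches via its "X word" prefix, so
--     # no plural patterns are needed), collecting the distinct counts seen into a
--     # set; then resolve emptiness / ambiguity once at the end.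
--     q = query.lower().strip()
--     counts = set()
--     for i in range(len(q)):
--         for pat, num in _PATTERNS:
--             if q.startswith(pat, i):
--                 counts.add(num)
--     if not counts:
--         raise ValueError("Unable to parse a valid filter from the query.")
--     if len(counts) > 1:
--         raise ValueError("Conflicting word count filters in the query.")
--     (num,) = counts
--     return {"word_count": str(num)}
-- ===== Notes on version B (the rewrite author's own statement) =====
-- stated objective: alternative
-- what changed: B replaces A's per-pattern substring containment tests with interleaved dict mutation by a single anchored sweep over the query (at each character position it tests which count pattern starts there, collecting the distinct counts into a set, with the plural patterns dropped as subsumed by their singular prefixes), resolving emptiness/ambiguity once at the end.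
import Mathlib
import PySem

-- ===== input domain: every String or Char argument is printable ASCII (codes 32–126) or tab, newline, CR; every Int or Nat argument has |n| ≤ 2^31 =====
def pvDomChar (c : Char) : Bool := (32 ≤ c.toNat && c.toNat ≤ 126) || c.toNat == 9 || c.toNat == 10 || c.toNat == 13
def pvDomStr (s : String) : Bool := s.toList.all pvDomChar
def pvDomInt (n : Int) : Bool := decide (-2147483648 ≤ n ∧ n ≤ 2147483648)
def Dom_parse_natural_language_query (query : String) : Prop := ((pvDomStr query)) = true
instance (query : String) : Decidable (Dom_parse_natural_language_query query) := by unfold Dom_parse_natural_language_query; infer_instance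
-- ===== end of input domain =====

-- B replaces A's per-pattern containment tests with one anchored position sweep over the
-- query (a set of matched counts, resolved once at the end); same return value on Pre_.

-- ===== PORT A =====
def pnlqA_word_to_num : List (String × Int) := [("two", 2), ("three", 3), ("four", 4), ("five", 5)]

-- A's for-loop over word_to_num.items(); `none` = the raise of the conflict ValueError
def pnlqA_loop (q : String) : List (String × Int) → PySem.Dict String String → Option (PySem.Dict String String)
  | [], parsed => some parsed
  | (word, num) :: rest, parsed =>
    if PySem.Str.isIn (word ++ " word") q || PySem.Str.isIn (word ++ " words") q then
      if (match PySem.Dict.get? parsed "word_count" with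
          | some v => v != PySem.Int.toStr num
          | none => false : Bool) then
        none  -- raise ValueError (conflicting word count filters)
      else
        pnlqA_loop q rest (PySem.Dict.insert parsed "word_count" (PySem.Int.toStr num))
    else
      pnlqA_loop q rest parsed

def parse_natural_language_query (query : String) : List (String × String) :=
  let q := PySem.Str.strip (PySem.Str.lower query)
  let parsed : PySem.Dict String String := PySem.Dict.empty
  let parsed :=
    if PySem.Str.isIn "single word" q || PySem.Str.isIn "one word" q then
      -- the inner conflict check of A is dead here (parsed is empty); transliterated:
      if (match PySem.Dict.get? parsed "word_count" with
          | some v => v != "1"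
          | none => false : Bool) then
        parsed  -- unreachable raise branch
      else
        PySem.Dict.insert parsed "word_count" "1"
    else parsed
  match pnlqA_loop q pnlqA_word_to_num parsed with
  | none => []  -- raise ValueError (conflict); outside Pre_
  | some parsed =>
    if parsed.items = [] then []  -- raise ValueError (unable to parse); outside Pre_
    else parsed.items

-- ===== PORT B =====
def pnlqB_words : List (String × Int) :=
  [("single word", 1), ("one word", 1), ("two word", 2),
   ("three word", 3), ("four word", 4), ("five word", 5)]

-- Source B's nested for-loop: for each position i of q, q.startswith(pat, i);
-- Python's startswith(p, i) with 0 ≤ i is exactly `p <+: q.drop i` (ported by hand, exact).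
def pnlqB_scan (q : List Char) : PySem.Set Int :=
  (PySem.List.pyRange 0 q.length 1).foldl (fun acc i =>
    pnlqB_words.foldl (fun acc e =>
      if PySem.Chars.startswith (q.drop i.toNat) e.1.toList
      then PySem.Set.add acc e.2 else acc) acc)
    PySem.Set.empty

def parse_natural_language_query_alt (query : String) : List (String × String) :=
  let q := (PySem.Str.strip (PySem.Str.lower query)).toList
  match pnlqB_scan q with
  | [] => []  -- raise ValueError (unable to parse); outside Pre_
  | [c] => [("word_count", PySem.Int.toStr c)]
  | _ :: _ :: _ => []  -- raise ValueError (conflict); outside Pre_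

-- ===== PRECONDITION & SPEC =====
-- Pre_ excludes exactly the inputs on which A raises ValueError: queries matching no
-- word-count pattern, or matching patterns of two different counts (a conflict).
def Pre_parse_natural_language_query (query : String) : Prop :=
  let q := PySem.Str.strip (PySem.Str.lower query)
  ([ PySem.Str.isIn "single word" q || PySem.Str.isIn "one word" q
   , PySem.Str.isIn "two word" q || PySem.Str.isIn "two words" q
   , PySem.Str.isIn "three word" q || PySem.Str.isIn "three words" q
   , PySem.Str.isIn "four word" q || PySem.Str.isIn "four words" q
   , PySem.Str.isIn "five word" q || PySem.Str.isIn "five words" q ].count true) = 1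
instance (query : String) : Decidable (Pre_parse_natural_language_query query) := by
  unfold Pre_parse_natural_language_query; infer_instance

def pvWitness_parse_natural_language_query : String := "two words please"

def Spec_parse_natural_language_query (query : String) (out : List (String × String)) : Prop := out = parse_natural_language_query_alt query
instance (query : String) (out : List (String × String)) : Decidable (Spec_parse_natural_language_query query out) := by unfold Spec_parse_natural_language_query; infer_instance

-- ===== CLAIM (what is proved, stated in full; the proofs are below) =====
def Claim_equal_parse_natural_language_query : Prop := ∀ (query : String), Dom_parse_natural_language_query query → Pre_parse_natural_language_query query → Spec_parse_natural_language_query query (parse_natural_language_query query)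

-- ===== LEMMAS AND PROOFS =====

-- membership in the inner word-loop fold
lemma pnlq_mem_foldl_add_if (l : List (String × Int)) (p : String × Int → Bool)
    (acc : PySem.Set Int) (c : Int) :
    c ∈ l.foldl (fun acc e => if p e then PySem.Set.add acc e.2 else acc) acc ↔
      c ∈ acc ∨ ∃ e ∈ l, p e = true ∧ e.2 = c := by
  induction l generalizing acc with
  | nil => simp
  | cons x t ih =>
    simp only [List.foldl_cons, ih]
    by_cases hx : p x = true
    · simp [hx, PySem.Set.mem_add]
      tauto
    · simp only [Bool.not_eq_true] at hx
      simp [hx]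

lemma pnlq_nodup_foldl_add_if (l : List (String × Int)) (p : String × Int → Bool)
    (acc : PySem.Set Int) (h : acc.Nodup) :
    (l.foldl (fun acc e => if p e then PySem.Set.add acc e.2 else acc) acc).Nodup := by
  induction l generalizing acc with
  | nil => exact h
  | cons x t ih =>
    simp only [List.foldl_cons]
    by_cases hx : p x = true
    · simp only [hx, if_pos]; exact ih _ (PySem.Set.nodup_add _ _ h)
    · simp only [Bool.not_eq_true] at hx; simp only [hx]; exact ih _ h

lemma pnlq_mem_scan (q : List Char) (c : Int) :
    c ∈ pnlqB_scan q ↔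
      ∃ e ∈ pnlqB_words, PySem.Chars.isIn (e.1.toList) q = true ∧ e.2 = c := by
  unfold pnlqB_scan
  have hfold : ∀ (idxs : List Int) (acc : PySem.Set Int),
      c ∈ idxs.foldl (fun acc i =>
        pnlqB_words.foldl (fun acc e =>
          if PySem.Chars.startswith (q.drop i.toNat) (e.1.toList)
          then PySem.Set.add acc e.2 else acc) acc) acc ↔
        c ∈ acc ∨ ∃ i ∈ idxs, ∃ e ∈ pnlqB_words,
          PySem.Chars.startswith (q.drop i.toNat) (e.1.toList) = true ∧ e.2 = c := by
    intro idxs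
    induction idxs with
    | nil => simp
    | cons j t ih =>
      intro acc
      simp only [List.foldl_cons, ih, pnlq_mem_foldl_add_if]
      constructor
      · rintro ((h | h) | h)
        · exact Or.inl h
        · exact Or.inr ⟨j, by simp, h⟩
        · obtain ⟨i, hi, he⟩ := h; exact Or.inr ⟨i, by simp [hi], he⟩
      · rintro (h | ⟨i, hi, he⟩)
        · exact Or.inl (Or.inl h)
        · rcases List.mem_cons.mp hi with rfl | hi
          · exact Or.inl (Or.inr he)
          · exact Or.inr ⟨i, hi, he⟩
  rw [hfold]
  simp only [PySem.Set.empty]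
  constructor
  · rintro (h | ⟨i, _, e, he, hsw, hc⟩)
    · simp at h
    · refine ⟨e, he, ?_, hc⟩
      rw [← PySem.Chars.exists_prefix_drop_iff_isIn]
      exact ⟨i.toNat, (PySem.Chars.startswith_iff _ _).mp hsw⟩
  · rintro ⟨e, he, hin, hc⟩
    obtain ⟨j, hj⟩ := (PySem.Chars.exists_prefix_drop_iff_isIn _ _).mpr hin
    have hjlen : j < q.length := by
      cases Nat.lt_or_ge j q.length with
      | inl h => exact h
      | inr h =>
        rw [List.drop_eq_nil_of_le h] at hj
        rw [List.prefix_nil] at hj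
        have : e ∈ pnlqB_words := he
        fin_cases this <;> simp_all
    refine Or.inr ⟨(j : Int), ?_, e, he, ?_, hc⟩
    · rw [PySem.List.mem_pyRange_one]; omega
    · rw [PySem.Chars.startswith_iff]
      simpa using hj

-- a Nodup list whose members are exactly {c} is [c]
lemma pnlq_nodup_singleton (l : List Int) (c : Int) (hnd : l.Nodup)
    (hmem : ∀ x, x ∈ l ↔ x = c) : l = [c] := by
  cases l with
  | nil => exact absurd ((hmem c).mpr rfl) (by simp)
  | cons a t =>
    have ha : a = c := (hmem a).mp (by simp)
    subst ha
    have ht : t = [] := by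
      cases t with
      | nil => rfl
      | cons b u =>
        have hb : b = a := (hmem b).mp (by simp)
        simp [hb] at hnd
    simp [ht]

lemma pnlq_nodup_scan (q : List Char) : (pnlqB_scan q).Nodup := by
  unfold pnlqB_scan
  generalize PySem.List.pyRange 0 q.length 1 = idxs
  have : ∀ (idxs : List Int) (acc : PySem.Set Int), acc.Nodup →
      (idxs.foldl (fun acc i =>
        pnlqB_words.foldl (fun acc e =>
          if PySem.Chars.startswith (q.drop i.toNat) e.1.toList
          then PySem.Set.add acc e.2 else acc) acc) acc).Nodup := by
    intro idxs
    induction idxs with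
    | nil => intro acc h; exact h
    | cons j t ih =>
      intro acc h
      exact ih _ (pnlq_nodup_foldl_add_if _ _ _ h)
  exact this idxs _ (by simp [PySem.Set.empty])

-- "X words" in q implies "X word" in q (the plural pattern is subsumed)
lemma pnlq_isIn_of_isIn_append_s (pat : List Char) (q : List Char)
    (h : PySem.Chars.isIn (pat ++ ['s']) q = true) :
    PySem.Chars.isIn pat q = true := by
  rw [PySem.Chars.isIn_iff_infix] at h ⊢
  exact List.IsInfix.trans ⟨[], ['s'], by simp⟩ h

-- ===== VERDICT (by name: the statement is the Claim_ definition above) =====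
theorem parse_natural_language_query_spec : Claim_equal_parse_natural_language_query := by
  intro query _ hpre
  unfold Pre_parse_natural_language_query at hpre
  rw [Spec_parse_natural_language_query]
  set q := PySem.Str.strip (PySem.Str.lower query) with hq
  clear_value q
  cases h1 : (PySem.Str.isIn "single word" q || PySem.Str.isIn "one word" q) <;>
  cases h2 : (PySem.Str.isIn "two word" q || PySem.Str.isIn "two words" q) <;>
  cases h3 : (PySem.Str.isIn "three word" q || PySem.Str.isIn "three words" q) <;>
  cases h4 : (PySem.Str.isIn "four word" q || PySem.Str.isIn "four words" q) <;>
  cases h5 : (PySem.Str.isIn "five word" q || PySem.Str.isIn "five words" q) <;>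
    simp only [h1, h2, h3, h4, h5, List.count_cons, List.count_nil, beq_self_eq_true,
      beq_iff_eq, reduceCtorEq, if_true, if_false, Nat.add_zero, Nat.zero_add] at hpre <;>
  first
    | exact absurd hpre (by decide)
    | (clear hpre
       simp at h1 h2 h3 h4 h5)
  · -- only group 5 matches
    obtain ⟨h1a, h1b⟩ := h1
    obtain ⟨h2a, h2b⟩ := h2
    obtain ⟨h3a, h3b⟩ := h3
    obtain ⟨h4a, h4b⟩ := h4
    have p5 : PySem.Chars.isIn ['f', 'i', 'v', 'e', ' ', 'w', 'o', 'r', 'd'] q.toList = true := by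
      rcases h5 with h | h
      · exact h
      · rw [show ['f', 'i', 'v', 'e', ' ', 'w', 'o', 'r', 'd', 's'] = ['f', 'i', 'v', 'e', ' ', 'w', 'o', 'r', 'd'] ++ ['s'] from rfl] at h
        exact pnlq_isIn_of_isIn_append_s _ _ h
    have hmem : ∀ x, x ∈ pnlqB_scan q.toList ↔ x = (5 : Int) := by
      intro x
      rw [pnlq_mem_scan]
      simp [pnlqB_words, h1a, h1b, h2a, h3a, h4a, p5]
      omega
    have hA : parse_natural_language_query query = [("word_count", PySem.Int.toStr 5)] := by
      unfold parse_natural_language_query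
      rw [← hq]
      simp [pnlqA_loop, pnlqA_word_to_num, h1a, h1b, h2a, h2b, h3a, h3b, h4a, h4b, h5, PySem.Dict.get?_empty]
      all_goals decide
    have hB : parse_natural_language_query_alt query = [("word_count", PySem.Int.toStr 5)] := by
      simp only [parse_natural_language_query_alt]
      rw [← hq]
      rw [pnlq_nodup_singleton _ _ (pnlq_nodup_scan q.toList) hmem]
    rw [hA, hB]

  · -- only group 4 matches
    obtain ⟨h1a, h1b⟩ := h1
    obtain ⟨h2a, h2b⟩ := h2
    obtain ⟨h3a, h3b⟩ := h3
    obtain ⟨h5a, h5b⟩ := h5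
    have p4 : PySem.Chars.isIn ['f', 'o', 'u', 'r', ' ', 'w', 'o', 'r', 'd'] q.toList = true := by
      rcases h4 with h | h
      · exact h
      · rw [show ['f', 'o', 'u', 'r', ' ', 'w', 'o', 'r', 'd', 's'] = ['f', 'o', 'u', 'r', ' ', 'w', 'o', 'r', 'd'] ++ ['s'] from rfl] at h
        exact pnlq_isIn_of_isIn_append_s _ _ h
    have hmem : ∀ x, x ∈ pnlqB_scan q.toList ↔ x = (4 : Int) := by
      intro x
      rw [pnlq_mem_scan]
      simp [pnlqB_words, h1a, h1b, h2a, h3a, h5a, p4]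
      omega
    have hA : parse_natural_language_query query = [("word_count", PySem.Int.toStr 4)] := by
      unfold parse_natural_language_query
      rw [← hq]
      simp [pnlqA_loop, pnlqA_word_to_num, h1a, h1b, h2a, h2b, h3a, h3b, h5a, h5b, h4, PySem.Dict.get?_empty]
      all_goals decide
    have hB : parse_natural_language_query_alt query = [("word_count", PySem.Int.toStr 4)] := by
      simp only [parse_natural_language_query_alt]
      rw [← hq]
      rw [pnlq_nodup_singleton _ _ (pnlq_nodup_scan q.toList) hmem]
    rw [hA, hB]

  · -- only group 3 matches
    obtain ⟨h1a, h1b⟩ := h1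
    obtain ⟨h2a, h2b⟩ := h2
    obtain ⟨h4a, h4b⟩ := h4
    obtain ⟨h5a, h5b⟩ := h5
    have p3 : PySem.Chars.isIn ['t', 'h', 'r', 'e', 'e', ' ', 'w', 'o', 'r', 'd'] q.toList = true := by
      rcases h3 with h | h
      · exact h
      · rw [show ['t', 'h', 'r', 'e', 'e', ' ', 'w', 'o', 'r', 'd', 's'] = ['t', 'h', 'r', 'e', 'e', ' ', 'w', 'o', 'r', 'd'] ++ ['s'] from rfl] at h
        exact pnlq_isIn_of_isIn_append_s _ _ h
    have hmem : ∀ x, x ∈ pnlqB_scan q.toList ↔ x = (3 : Int) := by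
      intro x
      rw [pnlq_mem_scan]
      simp [pnlqB_words, h1a, h1b, h2a, h4a, h5a, p3]
      omega
    have hA : parse_natural_language_query query = [("word_count", PySem.Int.toStr 3)] := by
      unfold parse_natural_language_query
      rw [← hq]
      simp [pnlqA_loop, pnlqA_word_to_num, h1a, h1b, h2a, h2b, h4a, h4b, h5a, h5b, h3, PySem.Dict.get?_empty]
      all_goals decide
    have hB : parse_natural_language_query_alt query = [("word_count", PySem.Int.toStr 3)] := by
      simp only [parse_natural_language_query_alt]
      rw [← hq]
      rw [pnlq_nodup_singleton _ _ (pnlq_nodup_scan q.toList) hmem]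
    rw [hA, hB]

  · -- only group 2 matches
    obtain ⟨h1a, h1b⟩ := h1
    obtain ⟨h3a, h3b⟩ := h3
    obtain ⟨h4a, h4b⟩ := h4
    obtain ⟨h5a, h5b⟩ := h5
    have p2 : PySem.Chars.isIn ['t', 'w', 'o', ' ', 'w', 'o', 'r', 'd'] q.toList = true := by
      rcases h2 with h | h
      · exact h
      · rw [show ['t', 'w', 'o', ' ', 'w', 'o', 'r', 'd', 's'] = ['t', 'w', 'o', ' ', 'w', 'o', 'r', 'd'] ++ ['s'] from rfl] at h
        exact pnlq_isIn_of_isIn_append_s _ _ h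
    have hmem : ∀ x, x ∈ pnlqB_scan q.toList ↔ x = (2 : Int) := by
      intro x
      rw [pnlq_mem_scan]
      simp [pnlqB_words, h1a, h1b, h3a, h4a, h5a, p2]
      omega
    have hA : parse_natural_language_query query = [("word_count", PySem.Int.toStr 2)] := by
      unfold parse_natural_language_query
      rw [← hq]
      simp [pnlqA_loop, pnlqA_word_to_num, h1a, h1b, h3a, h3b, h4a, h4b, h5a, h5b, h2, PySem.Dict.get?_empty]
      all_goals decide
    have hB : parse_natural_language_query_alt query = [("word_count", PySem.Int.toStr 2)] := by
      simp only [parse_natural_language_query_alt]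
      rw [← hq]
      rw [pnlq_nodup_singleton _ _ (pnlq_nodup_scan q.toList) hmem]
    rw [hA, hB]

  · -- only group 1 matches
    obtain ⟨h2a, h2b⟩ := h2
    obtain ⟨h3a, h3b⟩ := h3
    obtain ⟨h4a, h4b⟩ := h4
    obtain ⟨h5a, h5b⟩ := h5
    have hmem : ∀ x, x ∈ pnlqB_scan q.toList ↔ x = (1 : Int) := by
      intro x
      rw [pnlq_mem_scan]
      simp [pnlqB_words, h2a, h3a, h4a, h5a]
      constructor
      · rintro (⟨_, h⟩ | ⟨_, h⟩) <;> omega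
      · rintro rfl
        rcases h1 with h | h
        · exact Or.inl ⟨h, rfl⟩
        · exact Or.inr ⟨h, rfl⟩
    have hA : parse_natural_language_query query = [("word_count", PySem.Int.toStr 1)] := by
      unfold parse_natural_language_query
      rw [← hq]
      simp [pnlqA_loop, pnlqA_word_to_num, h2a, h2b, h3a, h3b, h4a, h4b, h5a, h5b, h1, PySem.Dict.get?_empty]
      all_goals decide
    have hB : parse_natural_language_query_alt query = [("word_count", PySem.Int.toStr 1)] := by
      simp only [parse_natural_language_query_alt]
      rw [← hq]
      rw [pnlq_nodup_singleton _ _ (pnlq_nodup_scan q.toList) hmem]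
    rw [hA, hB]
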